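-- pv_equiv track=rewrite | github.com/KimJinSuAI/CodingTestPractice | 프로그래머스/Level1/직업군 추천하기.py | solution
-- ===== SOURCE A (Python) =====
-- def solution(table, languages, preference):
--     Ntable = []
--     for t in table:
--         Ntable.append(t.split(" "))
--
--     answer = [[Ntable[i][0],0]for i in range(len(Ntable))]
--     for l,p in zip(languages,preference):
--         for i in range(len(Ntable)):
--             try:
--                 answer[i][1] += (6-Ntable[i].index(l))*p
--             except:
--                 answer[i][1] += 0
--
--     return sorted(answer, key = lambda x: (-x[1],x[0]))[0][0]
-- ===== SOURCE B (Python) =====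
-- def solution(table, languages, preference):
--     best = None  # (name, score), running maximum
--     for row in table:
--         tokens = row.split(" ")
--         pos = {}
--         for i, t in enumerate(tokens):
--             if t not in pos:
--                 pos[t] = i
--         score = sum((6 - pos[l]) * p for l, p in zip(languages, preference) if l in pos)
--         name = tokens[0]
--         if best is None or score > best[1] or (score == best[1] and name < best[0]):
--             best = (name, score)
--     return best[0]
-- ===== Notes on version B (the rewrite author's own statement) =====
-- stated objective: faster
-- what changed: Replaces A's build-all-score-rows-then-sort-and-take-first with a single running-best scan (strict-greater score, lexicographically-smaller name tie-break) using a per-row first-index dictionary of tokens instead of repeated list.index calls inside try/except.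
import Mathlib
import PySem

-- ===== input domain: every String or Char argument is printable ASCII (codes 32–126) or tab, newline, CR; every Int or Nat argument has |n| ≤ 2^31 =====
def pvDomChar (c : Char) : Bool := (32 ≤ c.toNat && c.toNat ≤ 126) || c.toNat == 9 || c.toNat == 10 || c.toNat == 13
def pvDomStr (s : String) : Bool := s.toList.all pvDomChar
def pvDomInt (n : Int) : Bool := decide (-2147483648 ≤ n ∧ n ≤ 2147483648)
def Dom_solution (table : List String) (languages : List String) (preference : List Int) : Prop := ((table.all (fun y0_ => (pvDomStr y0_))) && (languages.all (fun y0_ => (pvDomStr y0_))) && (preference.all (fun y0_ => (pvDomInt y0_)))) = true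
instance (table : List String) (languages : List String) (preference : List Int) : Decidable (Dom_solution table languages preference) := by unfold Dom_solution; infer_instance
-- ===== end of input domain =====

-- B replaces A's build-all-scores-then-sort by a single running-best scan with a
-- first-index dictionary per row, dropping the sort and the inner index scans (faster).

-- ===== PORT A =====
-- t.split(" ") (sep ≠ "", never raises); shared by both ports, as both Pythons call it
def pvSplitSp (t : String) : List String :=
  (PySem.Chars.splitOn t.toList [' ']).map String.ofList

-- body of A's inner loop:  try: answer[i][1] += (6-Ntable[i].index(l))*p  except: answer[i][1] += 0
def pvBodyA (Ntable : List (List String)) (lp : String × Int)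
    (a : List (String × Int)) (i : Int) : List (String × Int) :=
  let add : Int :=
    match PySem.List.index? (PySem.List.pyGetD Ntable i []) lp.1 with
    | some k => (6 - (k : Int)) * lp.2
    | none => 0
  let cur := PySem.List.pyGetD a i ("", (0 : Int))
  a.set i.toNat (cur.1, cur.2 + add)

def solution (table : List String) (languages : List String) (preference : List Int) : String :=
  -- Ntable = []; for t in table: Ntable.append(t.split(" "))
  let Ntable : List (List String) := table.foldl (fun acc t => acc ++ [pvSplitSp t]) []
  -- answer = [[Ntable[i][0], 0] for i in range(len(Ntable))]
  let answer : List (String × Int) :=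
    (PySem.List.pyRange 0 (Ntable.length : Int)).map
      (fun i => (PySem.List.pyGetD (PySem.List.pyGetD Ntable i []) 0 "", (0 : Int)))
  -- for l,p in zip(languages,preference): for i in range(len(Ntable)): <pvBodyA>
  let answer :=
    (languages.zip preference).foldl
      (fun ans lp => (PySem.List.pyRange 0 (Ntable.length : Int)).foldl (pvBodyA Ntable lp) ans)
      answer
  -- sorted(answer, key = lambda x: (-x[1], x[0]))[0][0]   ([0] raises on empty table → Pre_)
  ((PySem.List.sorted2 answer (fun x => -x.2) (fun x => x.1) false).headD ("", 0)).1

-- ===== PORT B =====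
-- pos = {}; for i, t in enumerate(tokens): if t not in pos: pos[t] = i
def pvPosOf (tokens : List String) : PySem.Dict String Int :=
  (PySem.List.enumerate tokens 0).foldl
    (fun d it => if d.contains it.2 then d else d.insert it.2 it.1) PySem.Dict.empty

def solution_alt (table : List String) (languages : List String) (preference : List Int) : String :=
  let best : Option (String × Int) :=
    table.foldl
      (fun best row =>
        let tokens := pvSplitSp row
        let pos := pvPosOf tokens
        -- score = sum((6 - pos[l]) * p for l, p in zip(languages, preference) if l in pos)
        let score : Int :=
          (((languages.zip preference).filter (fun lp => pos.contains lp.1)).map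
            (fun lp => (6 - pos.getD lp.1 0) * lp.2)).sum
        let name := PySem.List.pyGetD tokens 0 ""
        match best with
        | none => some (name, score)
        | some b =>
          if score > b.2 || (score == b.2 && decide (name < b.1)) then some (name, score) else some b)
      none
  match best with
  | some b => b.1
  | none => ""   -- unreachable under Pre_ (table ≠ []); Python B raises TypeError there

-- ===== PRECONDITION & SPEC =====
-- A's sorted(answer)[0] raises IndexError on an empty table (B raises TypeError there too).
def Pre_solution (table : List String) (languages : List String) (preference : List Int) : Prop :=
  table ≠ []
instance (table : List String) (languages : List String) (preference : List Int) : Decidable (Pre_solution table languages preference) := by unfold Pre_solution; infer_instance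

def pvWitness_solution : List String × List String × List Int :=
  (["java backend junior pizza 3", "python frontend senior chicken 5"], ["python", "java"], [5, 3])

def Spec_solution (table : List String) (languages : List String) (preference : List Int) (out : String) : Prop := out = solution_alt table languages preference
instance (table : List String) (languages : List String) (preference : List Int) (out : String) : Decidable (Spec_solution table languages preference out) := by unfold Spec_solution; infer_instance

-- ===== CLAIM (what is proved, stated in full; the proofs are below) =====
def Claim_equal_solution : Prop := ∀ (table : List String) (languages : List String) (preference : List Int), Dom_solution table languages preference → Pre_solution table languages preference → Spec_solution table languages preference (solution table languages preference)

-- ===== LEMMAS AND PROOFS =====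

-- the score contribution of one (language, preference) pair on one split row
def pvContrib (row : List String) (lp : String × Int) : Int :=
  match PySem.List.index? row lp.1 with
  | some k => (6 - (k : Int)) * lp.2
  | none => 0

-- the (name, total score) pair both programs compute for one table row
def pvRow (pairs : List (String × Int)) (t : String) : String × Int :=
  (PySem.List.pyGetD (pvSplitSp t) 0 "", (pairs.map (pvContrib (pvSplitSp t))).sum)

-- the lexicographic "strictly better" test shared by sorted2's key and B's scan
def pvBef (x h : String × Int) : Bool :=
  decide ((-x.2 : Int) < -h.2) || (!decide ((-h.2 : Int) < -x.2) && decide (x.1 < h.1))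

------------------------------------------------------------------------------
-- A-side: the nested update loops compute table.map (pvRow pairs)
------------------------------------------------------------------------------

lemma pvInner_gen (rows : List (List String)) (lp : String × Int) :
    ∀ (k s : Nat) (ans : List (String × Int)), s + k = rows.length → ans.length = rows.length →
      (PySem.List.pyRange (s : Int) (rows.length : Int)).foldl (pvBodyA rows lp) ans
        = ans.take s ++ ((ans.drop s).zip (rows.drop s)).map
            (fun pr => (pr.1.1, pr.1.2 + pvContrib pr.2 lp)) := by
  intro k
  induction k with
  | zero =>
    intro s ans hs hl
    have hs' : s = rows.length := by omega
    have h1 : PySem.List.pyRange (s : Int) (rows.length : Int) = [] := by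
      simp [PySem.List.pyRange]; omega
    rw [h1]
    simp [List.drop_eq_nil_of_le, hs', hl.le, List.take_of_length_le]
  | succ k ih =>
    intro s ans hs hl
    have hslt : s < rows.length := by omega
    have hslt' : s < ans.length := by omega
    have h1 : PySem.List.pyRange (s : Int) (rows.length : Int)
        = (s : Int) :: PySem.List.pyRange ((s : Int) + 1) (rows.length : Int) :=
      PySem.List.pyRange_one_cons (by exact_mod_cast hslt)
    rw [h1, List.foldl_cons]
    have hb : pvBodyA rows lp ans (s : Int)
        = ans.set s (ans[s].1, ans[s].2 + pvContrib rows[s] lp) := by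
      simp [pvBodyA, pvContrib, PySem.List.pyGetD_natCast, List.getD_eq_getElem?_getD,
        List.getElem?_eq_getElem hslt, List.getElem?_eq_getElem hslt']
    rw [hb]
    have hcast : ((s : Int) + 1) = ((s + 1 : Nat) : Int) := by push_cast; ring
    rw [hcast, ih (s+1) _ (by omega) (by simp; omega)]
    rw [List.take_set, List.drop_set]
    have h2 : (List.take (s+1) ans).set s (ans[s].1, ans[s].2 + pvContrib rows[s] lp)
        = List.take s ans ++ [(ans[s].1, ans[s].2 + pvContrib rows[s] lp)] := by
      rw [List.take_add_one, List.getElem?_eq_getElem hslt', List.set_append]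
      simp [Nat.min_eq_left hslt'.le]
    rw [h2]
    conv_rhs => rw [List.drop_eq_getElem_cons hslt', List.drop_eq_getElem_cons hslt]
    simp only [Nat.lt_succ_self, if_pos, List.zip_cons_cons, List.map_cons,
      List.append_assoc, List.cons_append, List.nil_append]

lemma pvInner (rows : List (List String)) (lp : String × Int)
    (ans : List (String × Int)) (h : ans.length = rows.length) :
    (PySem.List.pyRange 0 (rows.length : Int)).foldl (pvBodyA rows lp) ans
      = (ans.zip rows).map (fun pr => (pr.1.1, pr.1.2 + pvContrib pr.2 lp)) := by
  simpa using pvInner_gen rows lp rows.length 0 ans (by omega) h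

lemma pvOuter (table : List String) (pairs : List (String × Int)) :
    ∀ (c : String → Int),
    pairs.foldl (fun ans lp =>
        (PySem.List.pyRange 0 ((table.map pvSplitSp).length : Int)).foldl
          (pvBodyA (table.map pvSplitSp) lp) ans)
      (table.map (fun t => (PySem.List.pyGetD (pvSplitSp t) 0 "", c t)))
      = table.map (fun t => (PySem.List.pyGetD (pvSplitSp t) 0 "",
          c t + (pairs.map (pvContrib (pvSplitSp t))).sum)) := by
  induction pairs with
  | nil => intro c; simp
  | cons lp ps ih =>
    intro c
    rw [List.foldl_cons]
    have hlen : (table.map (fun t => (PySem.List.pyGetD (pvSplitSp t) 0 "", c t))).length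
        = (table.map pvSplitSp).length := by simp
    rw [pvInner (table.map pvSplitSp) lp _ hlen]
    have hz : ((table.map (fun t => (PySem.List.pyGetD (pvSplitSp t) 0 "", c t))).zip
          (table.map pvSplitSp)).map (fun pr => (pr.1.1, pr.1.2 + pvContrib pr.2 lp))
        = table.map (fun t =>
            (PySem.List.pyGetD (pvSplitSp t) 0 "", c t + pvContrib (pvSplitSp t) lp)) := by
      rw [List.zip_map', List.map_map]; rfl
    rw [hz, ih (fun t => c t + pvContrib (pvSplitSp t) lp)]
    simp [add_assoc]

------------------------------------------------------------------------------
-- B-side: the dict holds first indices, so B's row score equals A's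
------------------------------------------------------------------------------

lemma pvPos_get (l : String) :
    ∀ (tokens : List String) (s : Int) (d : PySem.Dict String Int),
      ((PySem.List.enumerate tokens s).foldl
          (fun d it => if d.contains it.2 then d else d.insert it.2 it.1) d).get? l
        = if d.contains l then d.get? l
          else (PySem.List.index? tokens l).map (fun k => s + (k : Int)) := by
  intro tokens
  induction tokens with
  | nil =>
    intro s d
    simp [PySem.List.enumerate]
    intro hc
    exact (PySem.Dict.get?_eq_none_iff_contains d l).mpr hc
  | cons t ts ih =>
    intro s d
    rw [PySem.List.enumerate_cons, List.foldl_cons, ih (s+1) _]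
    by_cases hct : d.contains t
    · simp only [hct, if_true]
      by_cases hcl : d.contains l
      · rw [if_pos hcl, if_pos hcl]
      · rw [if_neg hcl, if_neg hcl]
        have htl : t ≠ l := by rintro rfl; rw [hct] at hcl; exact hcl rfl
        rw [PySem.List.index?_cons_of_ne ts htl]
        cases hidx : PySem.List.index? ts l <;> simp [hidx] <;> omega
    · simp only [hct, Bool.false_eq_true, if_false]
      by_cases hcl : d.contains l
      · have hc2 : (d.insert t s).contains l = true := by
          rw [PySem.Dict.contains_insert]; simp [hcl]
        rw [if_pos hc2, if_pos hcl]
        have htl : l ≠ t := by rintro rfl; rw [hcl] at hct; exact hct rfl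
        rw [PySem.Dict.get?_insert, if_neg htl]
      · by_cases hlt : l = t
        · subst hlt
          have hc2 : (d.insert l s).contains l = true := by
            rw [PySem.Dict.contains_insert]; simp
          rw [if_pos hc2, if_neg hcl, PySem.Dict.get?_insert, if_pos rfl,
            PySem.List.index?_cons_self]
          simp
        · have hc2 : (d.insert t s).contains l = false := by
            rw [PySem.Dict.contains_insert]; simp [hcl, hlt]
          rw [if_neg (by simp [hc2]), if_neg hcl]
          have htl : t ≠ l := fun h => hlt h.symm
          rw [PySem.List.index?_cons_of_ne ts htl]
          cases hidx : PySem.List.index? ts l <;> simp [hidx] <;> omega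

lemma pvPos_get0 (tokens : List String) (l : String) :
    (pvPosOf tokens).get? l = (PySem.List.index? tokens l).map (fun k => ((k : Nat) : Int)) := by
  rw [pvPosOf, pvPos_get l tokens 0 PySem.Dict.empty]
  simp [PySem.Dict.contains_empty]
  cases h : List.idxOf? l tokens <;> simp [h]

lemma pvPos_contains (tokens : List String) (l : String) :
    (pvPosOf tokens).contains l = (PySem.List.index? tokens l).isSome := by
  rw [PySem.Dict.contains_eq_isSome_get?, pvPos_get0]
  cases PySem.List.index? tokens l <;> simp

lemma pvScoreB (tokens : List String) (pairs : List (String × Int)) :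
    ((pairs.filter (fun lp => (pvPosOf tokens).contains lp.1)).map
        (fun lp => (6 - (pvPosOf tokens).getD lp.1 0) * lp.2)).sum
      = (pairs.map (pvContrib tokens)).sum := by
  induction pairs with
  | nil => simp
  | cons lp ps ih =>
    rw [List.filter_cons, List.map_cons, List.sum_cons]
    cases hidx : PySem.List.index? tokens lp.1 with
    | none =>
      have hc : (pvPosOf tokens).contains lp.1 = false := by
        rw [pvPos_contains, hidx]; rfl
      rw [hc]
      simp only [Bool.false_eq_true, if_false, ih, pvContrib, hidx]
      simp
    | some k =>
      have hc : (pvPosOf tokens).contains lp.1 = true := by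
        rw [pvPos_contains, hidx]; rfl
      have hg : (pvPosOf tokens).getD lp.1 0 = (k : Int) := by
        rw [PySem.Dict.getD_eq_get?_getD, pvPos_get0, hidx]; rfl
      rw [hc, if_pos rfl, List.map_cons, List.sum_cons, hg, ih]
      simp only [pvContrib, hidx]

------------------------------------------------------------------------------
-- selection: head of the insertion sort = running best under pvBef
------------------------------------------------------------------------------

lemma pvBef_eq (x h : String × Int) :
    pvBef x h = (decide (x.2 > h.2) || (x.2 == h.2 && decide (x.1 < h.1))) := by
  unfold pvBef
  by_cases h1 : x.2 > h.2
  · simp [h1, show (-x.2 : Int) < -h.2 by omega]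
  · by_cases h2 : x.2 = h.2
    · simp [h1, h2]
    · have h3 : ¬ ((-x.2 : Int) < -h.2) := by omega
      have h4 : ((-h.2 : Int) < -x.2) := by omega
      simp [h3, h4, h1, h2]

lemma pvInsertBy_ne_nil {α : Type} (bef : α → α → Bool) (x : α) (ys : List α) :
    PySem.List.insertBy bef x ys ≠ [] := by
  cases ys with
  | nil => simp [PySem.List.insertBy]
  | cons y ys => simp only [PySem.List.insertBy]; split <;> simp

lemma pvHead_foldl_insertBy {α : Type} (bef : α → α → Bool) (d : α) :
    ∀ (t : List α) (acc : List α), acc ≠ [] →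
      ((t.foldl (fun acc x => PySem.List.insertBy bef x acc) acc).headD d)
        = t.foldl (fun h x => if bef x h then x else h) (acc.headD d) := by
  intro t
  induction t with
  | nil => intro acc h; rfl
  | cons x xs ih =>
    intro acc hacc
    cases acc with
    | nil => exact absurd rfl hacc
    | cons y ys =>
      rw [List.foldl_cons, List.foldl_cons, ih _ (pvInsertBy_ne_nil bef x (y :: ys))]
      congr 1
      simp only [PySem.List.insertBy]
      split <;> simp_all

-- the (name, score) candidate B computes for one row
def pvCand (languages : List String) (preference : List Int) (row : String) : String × Int :=
  let tokens := pvSplitSp row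
  let pos := pvPosOf tokens
  (PySem.List.pyGetD tokens 0 "",
   (((languages.zip preference).filter (fun lp => pos.contains lp.1)).map
      (fun lp => (6 - pos.getD lp.1 0) * lp.2)).sum)

-- B's Option-valued scan, once started, is a plain running best
lemma pvOptFold (languages : List String) (preference : List Int) :
    ∀ (rows : List String) (b : String × Int),
      rows.foldl
        (fun best row =>
          let tokens := pvSplitSp row
          let pos := pvPosOf tokens
          let score : Int :=
            (((languages.zip preference).filter (fun lp => pos.contains lp.1)).map
              (fun lp => (6 - pos.getD lp.1 0) * lp.2)).sum
          let name := PySem.List.pyGetD tokens 0 ""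
          match best with
          | none => some (name, score)
          | some b =>
            if score > b.2 || (score == b.2 && decide (name < b.1)) then some (name, score)
            else some b)
        (some b)
      = some (rows.foldl
          (fun h row =>
            if (pvCand languages preference row).2 > h.2 ||
               ((pvCand languages preference row).2 == h.2 &&
                decide ((pvCand languages preference row).1 < h.1)) then
              pvCand languages preference row
            else h) b) := by
  intro rows
  induction rows with
  | nil => intro b; rfl
  | cons r rs ih =>
    intro b
    rw [List.foldl_cons, List.foldl_cons]
    change rs.foldl _ (if (decide ((pvCand languages preference r).2 > b.2) ||
        ((pvCand languages preference r).2 == b.2 &&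
         decide ((pvCand languages preference r).1 < b.1))) = true then
        some (pvCand languages preference r) else some b) = _
    rw [← apply_ite some]
    exact ih _

lemma pvMapGet (xs : List (List String)) :
    (PySem.List.pyRange 0 (xs.length : Int)).map
        (fun i => (PySem.List.pyGetD (PySem.List.pyGetD xs i []) 0 "", (0 : Int)))
      = xs.map (fun row => (PySem.List.pyGetD row 0 "", (0 : Int))) := by
  conv_lhs => rw [show (fun i => (PySem.List.pyGetD (PySem.List.pyGetD xs i []) 0 "", (0 : Int)))
      = (fun row => (PySem.List.pyGetD row 0 "", (0 : Int)))
          ∘ (fun i => PySem.List.pyGetD xs i []) from rfl]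
  rw [← List.map_map]
  rw [show ((xs.length : Int)) = PySem.List.len xs from rfl,
    PySem.List.map_pyGetD_pyRange_zero]

lemma pvCand_eq (languages : List String) (preference : List Int) (row : String) :
    pvCand languages preference row = pvRow (languages.zip preference) row := by
  simp only [pvCand, pvRow]
  exact congrArg _ (pvScoreB (pvSplitSp row) (languages.zip preference))

lemma pvSel (x : String × Int) (t : List (String × Int)) :
    (PySem.List.sorted2 (x :: t) (fun y => -y.2) (fun y => y.1) false).headD ("", 0)
      = t.foldl (fun h y => if pvBef y h then y else h) x := by
  show (((x :: t).foldl (fun acc y => PySem.List.insertBy pvBef y acc) []).headD ("", 0)) = _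
  rw [List.foldl_cons]
  rw [show PySem.List.insertBy pvBef x ([] : List (String × Int)) = [x] from rfl]
  rw [pvHead_foldl_insertBy pvBef ("", 0) t [x] (by simp)]
  rfl

lemma pvOptFold0 (languages : List String) (preference : List Int)
    (r0 : String) (rs : List String) :
    (r0 :: rs).foldl
        (fun best row =>
          let tokens := pvSplitSp row
          let pos := pvPosOf tokens
          let score : Int :=
            (((languages.zip preference).filter (fun lp => pos.contains lp.1)).map
              (fun lp => (6 - pos.getD lp.1 0) * lp.2)).sum
          let name := PySem.List.pyGetD tokens 0 ""
          match best with
          | none => some (name, score)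
          | some b =>
            if score > b.2 || (score == b.2 && decide (name < b.1)) then some (name, score)
            else some b)
        none
      = some (rs.foldl
          (fun h row =>
            if (pvCand languages preference row).2 > h.2 ||
               ((pvCand languages preference row).2 == h.2 &&
                decide ((pvCand languages preference row).1 < h.1)) then
              pvCand languages preference row
            else h) (pvCand languages preference r0)) := by
  rw [List.foldl_cons]
  exact pvOptFold languages preference rs (pvCand languages preference r0)

lemma pvMain (table : List String) (languages : List String) (preference : List Int)
    (h : table ≠ []) :
    solution table languages preference = solution_alt table languages preference := by
  cases table with
  | nil => exact absurd rfl h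
  | cons t0 rest =>
    have hN : (t0 :: rest).foldl (fun acc t => acc ++ [pvSplitSp t]) ([] : List (List String))
        = (t0 :: rest).map pvSplitSp := by
      simpa using PySem.List.foldl_append_singleton_eq_map pvSplitSp (t0 :: rest) []
    have hA : solution (t0 :: rest) languages preference
        = ((PySem.List.sorted2 ((t0 :: rest).map (pvRow (languages.zip preference)))
            (fun x => -x.2) (fun x => x.1) false).headD ("", 0)).1 := by
      simp only [solution]
      rw [hN, pvMapGet, List.map_map]
      simp only [Function.comp_def]
      rw [pvOuter (t0 :: rest) (languages.zip preference) (fun _ => 0)]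
      simp only [zero_add]
      rfl
    have hB : solution_alt (t0 :: rest) languages preference
        = (rest.foldl (fun h row =>
            if (pvCand languages preference row).2 > h.2 ||
               ((pvCand languages preference row).2 == h.2 &&
                decide ((pvCand languages preference row).1 < h.1)) then
              pvCand languages preference row else h) (pvCand languages preference t0)).1 := by
      simp only [solution_alt]
      rw [pvOptFold0]
    rw [hA, hB, List.map_cons, pvSel, List.foldl_map]
    simp only [pvCand_eq, pvBef_eq]
-- ===== VERDICT (by name: the statement is the Claim_ definition above) =====
theorem solution_spec : Claim_equal_solution := by
  intro table languages preference _ hpre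
  unfold Spec_solution
  exact pvMain table languages preference hpre
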